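-- pv_equiv track=rewrite | github.com/Elizabeth-Martin2/leet-code | algorithms/heaps/sweet_cookies.py | cookiesBF
-- ===== SOURCE A (Python) =====
-- from bisect import insort
--
-- def cookiesBF(k, A):
--     if len(A) == 1:
--         return 0 if A[0] >= k else -1
--
--     A.sort() # n log n
--     count = 0
--
--     while A[0] < k and len(A) > 2: # n
--         count += 1
--         new_cookie = A[0] + A[1] * 2
--
--         del A[0:2]  # n
--         insort(A, new_cookie)  # n log n
--
--     if A[0] >= k:
--         return count
--     else:
--         return -1
-- ===== SOURCE B (Python) =====
-- def cookiesBF(k, A):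
--     # Selection-based re-implementation: no sorting at all; each round scans the
--     # multiset for its two smallest cookies, combines them, appends the result.
--     # Does not mutate A (the original sorts A in place); return value only.
--     cookies = list(A)
--     count = 0
--     while len(cookies) > 2:
--         smallest = min(cookies)
--         if smallest >= k:
--             return count
--         cookies.remove(smallest)
--         second = min(cookies)
--         cookies.remove(second)
--         cookies.append(smallest + 2 * second)
--         count += 1
--     return count if min(cookies) >= k else -1
-- ===== Notes on version B (the rewrite author's own statement) =====
-- stated objective: alternative
-- what changed: B never sorts and maintains no order: instead of sorting once and keeping the list sorted with del+bisect.insort, each round scans the unsorted multiset for the two smallest cookies with min(), removes them, and appends the combined cookie; B also leaves the argument list unmutated (A sorts it in place).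
-- outside the precondition, e.g. on cookiesBF(5, []): A raises IndexError, B raises ValueError
import Mathlib
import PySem

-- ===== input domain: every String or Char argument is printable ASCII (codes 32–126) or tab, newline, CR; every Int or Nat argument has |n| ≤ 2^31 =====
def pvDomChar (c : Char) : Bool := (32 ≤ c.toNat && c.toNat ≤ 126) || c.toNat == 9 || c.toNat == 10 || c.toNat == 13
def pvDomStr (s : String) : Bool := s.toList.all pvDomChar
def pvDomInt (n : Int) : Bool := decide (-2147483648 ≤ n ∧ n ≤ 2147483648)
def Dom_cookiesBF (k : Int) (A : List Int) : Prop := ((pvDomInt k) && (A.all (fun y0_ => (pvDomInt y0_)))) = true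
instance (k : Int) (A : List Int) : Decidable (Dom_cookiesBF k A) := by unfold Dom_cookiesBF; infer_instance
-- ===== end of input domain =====

-- B replaces A's sort + ordered del/insort maintenance with per-round min-scans over the
-- unsorted multiset (alternative decomposition, same cost); equivalence is about the RETURN
-- value only: A sorts its argument list in place, B leaves it unmutated.

-- ===== PORT A =====

-- bisect.insort (= insort_right): insert x after existing equal elements of a sorted list
def pvInsort (x : Int) : List Int → List Int
  | [] => [x]
  | y :: ys => if x < y then x :: y :: ys else y :: pvInsort x ys

theorem pvInsort_length (x : Int) (t : List Int) : (pvInsort x t).length = t.length + 1 := by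
  induction t with
  | nil => rfl
  | cons y ys ih => simp only [pvInsort]; split <;> simp [ih]

-- the while loop of A, on the sorted list s: while A[0] < k and len(A) > 2
def cookiesBFLoop (k : Int) (s : List Int) (count : Int) : Int :=
  if (PySem.List.pyGet? s 0).getD 0 < k ∧ 2 < s.length then
    -- new_cookie = A[0] + A[1] * 2 ; del A[0:2] ; insort(A, new_cookie)
    let new_cookie := (PySem.List.pyGet? s 0).getD 0 + (PySem.List.pyGet? s 1).getD 0 * 2
    cookiesBFLoop k (pvInsort new_cookie (s.drop 2)) (count + 1)
  else
    if (PySem.List.pyGet? s 0).getD 0 ≥ k then count else -1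
termination_by s.length
decreasing_by
  rename_i h
  rw [pvInsort_length]
  simp only [List.length_drop]
  omega

def cookiesBF (k : Int) (A : List Int) : Int :=
  if A.length = 1 then
    if (PySem.List.pyGet? A 0).getD 0 ≥ k then 0 else -1
  else
    cookiesBFLoop k (PySem.List.sorted A (fun x => x) false) 0

-- ===== PORT B =====

-- two lemmas the recursion of B's loop cites for termination
theorem pvMin?_isSome {l : List Int} (h : l ≠ []) :
    ∃ m, PySem.List.min? l (fun x => x) = some m ∧ m ∈ l := by
  cases hm : PySem.List.min? l (fun x => x) with
  | none => exact absurd ((PySem.List.min?_eq_none_iff l (fun x => x)).mp hm) h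
  | some m => exact ⟨m, rfl, PySem.List.min?_mem hm⟩

theorem pvRemoveMin_length {l : List Int} (h : l ≠ []) :
    ((PySem.List.remove? l ((PySem.List.min? l (fun x => x)).getD 0)).getD []).length + 1
      = l.length := by
  obtain ⟨m, hm, hmem⟩ := pvMin?_isSome h
  rw [hm]
  simp only [Option.getD_some]
  rw [PySem.List.remove?_eq_some_erase l m hmem]
  have := List.length_pos_of_mem hmem
  simp [List.length_erase_of_mem hmem]
  omega

-- the while loop of B: while len(cookies) > 2: scan two minima, remove, append combined
def cookiesBFAltLoop (k : Int) (l : List Int) (count : Int) : Int :=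
  if 2 < l.length then
    let smallest := (PySem.List.min? l (fun x => x)).getD 0
    if smallest ≥ k then count
    else
      let l1 := (PySem.List.remove? l smallest).getD []
      let second := (PySem.List.min? l1 (fun x => x)).getD 0
      let l2 := (PySem.List.remove? l1 second).getD []
      cookiesBFAltLoop k (l2 ++ [smallest + 2 * second]) (count + 1)
  else
    if (PySem.List.min? l (fun x => x)).getD 0 ≥ k then count else -1
termination_by l.length
decreasing_by
  rename_i h _
  have h1 := pvRemoveMin_length (l := l) (by intro hnil; subst hnil; simp at h)
  have h2 := pvRemoveMin_length
      (l := (PySem.List.remove? l ((PySem.List.min? l (fun x => x)).getD 0)).getD [])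
      (by intro hnil; rw [hnil] at h1; simp at h1; omega)
  simp only [List.length_append, List.length_singleton]
  omega

def cookiesBF_alt (k : Int) (A : List Int) : Int :=
  cookiesBFAltLoop k A 0

-- ===== PRECONDITION & SPEC =====
-- Pre_ excludes only the empty list, on which Python A raises IndexError (A[0]); B raises ValueError there (min([])).
def Pre_cookiesBF (k : Int) (A : List Int) : Prop := A ≠ []
instance (k : Int) (A : List Int) : Decidable (Pre_cookiesBF k A) := by unfold Pre_cookiesBF; infer_instance
def pvWitness_cookiesBF : Int × List Int := (5, [1, 2, 3])

def Spec_cookiesBF (k : Int) (A : List Int) (out : Int) : Prop := out = cookiesBF_alt k A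
instance (k : Int) (A : List Int) (out : Int) : Decidable (Spec_cookiesBF k A out) := by unfold Spec_cookiesBF; infer_instance

-- ===== CLAIM (what is proved, stated in full; the proofs are below) =====
def Claim_equal_cookiesBF : Prop := ∀ (k : Int) (A : List Int), Dom_cookiesBF k A → Pre_cookiesBF k A → Spec_cookiesBF k A (cookiesBF k A)

-- ===== LEMMAS AND PROOFS =====

theorem pvInsort_perm (x : Int) (t : List Int) : (pvInsort x t).Perm (x :: t) := by
  induction t with
  | nil => exact List.Perm.refl _
  | cons y ys ih =>
    simp only [pvInsort]
    split
    · exact List.Perm.refl _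
    · exact (List.Perm.cons y ih).trans (List.Perm.swap x y ys)

theorem pvInsort_pairwise (x : Int) (t : List Int) (h : t.Pairwise (· ≤ ·)) :
    (pvInsort x t).Pairwise (· ≤ ·) := by
  induction t with
  | nil => simp [pvInsort]
  | cons y ys ih =>
    simp only [pvInsort]
    rcases h with _ | ⟨hy, hys⟩
    split
    · rename_i hxy
      refine List.Pairwise.cons ?_ (List.Pairwise.cons hy hys)
      intro z hz
      rcases List.mem_cons.mp hz with rfl | hz
      · exact le_of_lt hxy
      · exact le_of_lt (lt_of_lt_of_le hxy (hy _ hz))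
    · rename_i hxy
      refine List.Pairwise.cons ?_ (ih hys)
      intro z hz
      have := (pvInsort_perm x ys).mem_iff.mp hz
      rcases List.mem_cons.mp this with rfl | hz2
      · omega
      · exact hy _ hz2

-- min() of a list permuting a sorted a :: s' is a
theorem pvMin_of_perm_sorted {l s' : List Int} {a : Int}
    (hp : l.Perm (a :: s')) (hs : (a :: s').Pairwise (· ≤ ·)) :
    PySem.List.min? l (fun x => x) = some a := by
  have hne : l ≠ [] := by
    intro h; subst h; exact (List.cons_ne_nil a s') hp.symm.eq_nil
  obtain ⟨m, hm, hmem⟩ := pvMin?_isSome hne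
  have hmin := PySem.List.min?_isMin hm
  have ha : a ∈ l := hp.symm.subset (List.mem_cons_self)
  have hma : m ≤ a := hmin a ha
  have ham : a ≤ m := by
    have hm2 : m ∈ a :: s' := hp.subset hmem
    rcases List.mem_cons.mp hm2 with rfl | hms
    · exact le_refl _
    · rcases hs with _ | ⟨hh, _⟩
      exact hh _ hms
  rw [hm, le_antisymm hma ham]

-- main loop equivalence: B's loop on any l matches A's loop on the sorted rearrangement s
theorem pvLoop_eq (k : Int) : ∀ (n : Nat) (l s : List Int) (count : Int),
    l.length = n → l.Perm s → s.Pairwise (· ≤ ·) →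
    cookiesBFAltLoop k l count = cookiesBFLoop k s count := by
  intro n
  induction n using Nat.strong_induction_on with
  | _ n ih =>
    intro l s count hlen hp hs
    have hlslen : l.length = s.length := hp.length_eq
    cases s with
    | nil =>
      have hl : l = [] := hp.eq_nil
      subst hl
      rw [cookiesBFAltLoop, cookiesBFLoop]
      simp [PySem.List.min?, PySem.List.pyGet?]
    | cons a s' =>
      have hmin : PySem.List.min? l (fun x => x) = some a := pvMin_of_perm_sorted hp hs
      rw [cookiesBFAltLoop, cookiesBFLoop]
      simp only [hmin, Option.getD_some, PySem.List.pyGet?_zero_cons]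
      by_cases hlen2 : 2 < l.length
      · have hslen2 : 2 < (a :: s').length := hlslen ▸ hlen2
        by_cases hak : a ≥ k
        · rw [if_pos hlen2,
            if_neg (show ¬(a < k ∧ 2 < (a :: s').length) from
              fun hc => absurd hc.1 (not_lt.mpr hak))]
          simp [hak]
        · -- both recurse
          have hak' : a < k := lt_of_not_ge hak
          rw [if_pos hlen2, if_neg hak, if_pos ⟨hak', hslen2⟩]
          -- identify B's removals with the tail of s
          have hamem : a ∈ l := hp.symm.subset (List.mem_cons_self)
          have hl1 : (PySem.List.remove? l a).getD [] = l.erase a := by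
            rw [PySem.List.remove?_eq_some_erase l a hamem]; rfl
          have hp1 : (l.erase a).Perm s' := by
            have := hp.erase a
            simpa using this
          -- s' is nonempty (length ≥ 2)
          cases s' with
          | nil => simp at hslen2
          | cons b s'' =>
            have hs' : (b :: s'').Pairwise (· ≤ ·) := hs.of_cons
            have hmin1 : PySem.List.min? (l.erase a) (fun x => x) = some b :=
              pvMin_of_perm_sorted hp1 hs'
            have hbmem : b ∈ l.erase a := hp1.symm.subset (List.mem_cons_self)
            have hl2 : (PySem.List.remove? (l.erase a) b).getD [] = (l.erase a).erase b := by
              rw [PySem.List.remove?_eq_some_erase (l.erase a) b hbmem]; rfl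
            have hp2 : ((l.erase a).erase b).Perm s'' := by
              have := hp1.erase b
              simpa using this
            have hg1 : PySem.List.pyGet? (a :: b :: s'') 1 = some b := by
              simp [PySem.List.pyGet?, PySem.List.pyIdx?]
            have hdrop : List.drop 2 (a :: b :: s'') = s'' := rfl
            simp only [hl1, hmin1, Option.getD_some, hl2, hg1, hdrop]
            have hc : a + 2 * b = a + b * 2 := by ring
            rw [hc]
            have hrec : ((l.erase a).erase b ++ [a + b * 2]).Perm
                (pvInsort (a + b * 2) s'') := by
              refine List.Perm.trans ?_ (pvInsort_perm (a + b * 2) s'').symm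
              exact (hp2.append_right [a + b * 2]).trans (List.perm_append_singleton _ _)
            have hsorted2 : (pvInsort (a + b * 2) s'').Pairwise (· ≤ ·) :=
              pvInsort_pairwise _ _ hs'.of_cons
            have hlen' : ((l.erase a).erase b ++ [a + b * 2]).length = n - 1 := by
              have h1 : (l.erase a).length = l.length - 1 := List.length_erase_of_mem hamem
              have h2 : ((l.erase a).erase b).length = (l.erase a).length - 1 :=
                List.length_erase_of_mem hbmem
              simp only [List.length_append, List.length_singleton, h2, h1]
              omega
            exact ih (n - 1) (by omega) _ _ (count + 1) hlen' hrec hsorted2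
      · have hslen2 : ¬ 2 < (a :: s').length := hlslen ▸ hlen2
        rw [if_neg hlen2,
          if_neg (show ¬(a < k ∧ 2 < (a :: s').length) from fun hc => hslen2 hc.2)]

-- evaluate B's loop on a singleton (A's special len == 1 branch)
theorem pvAltLoop_singleton (k a : Int) :
    cookiesBFAltLoop k [a] 0 = if a ≥ k then 0 else -1 := by
  rw [cookiesBFAltLoop]
  simp [PySem.List.min?]

-- ===== VERDICT (by name: the statement is the Claim_ definition above) =====
theorem cookiesBF_spec : Claim_equal_cookiesBF := by
  intro k A _ hpre
  unfold Spec_cookiesBF cookiesBF cookiesBF_alt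
  by_cases h1 : A.length = 1
  · obtain ⟨a, rfl⟩ := List.length_eq_one_iff.mp h1
    simp [h1, pvAltLoop_singleton]
  · simp only [h1, if_false]
    exact (pvLoop_eq k A.length A (PySem.List.sorted A (fun x => x) false) 0 rfl
      (PySem.List.sorted_perm A (fun x => x) false).symm
      (by simpa using PySem.List.sorted_pairwise A (fun x => x))).symm
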